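-- pv_equiv track=rewrite | github.com/foreverNP/BSU | 3.1/linux/lab3/linuxtask/task1.py | prize_draw
-- ===== SOURCE A (Python) =====
-- def calc_som(name):
--     som = 0
--     name = name.upper()
--     for ch in name:
--         if "A" <= ch <= "Z":
--             som += ord(ch) - ord("A") + 1
--     return som + len(name)
--
-- def prize_draw(st, we, n):
--     if not st:
--         return "Нет участников"
--
--     names = st.split(",")
--
--     if n > len(names):
--         return "Недостаточно участников"
--
--     participants = []
--
--     for i, name in enumerate(names):
--         som = calc_som(name)
--         win_number = som * we[i]
--         participants.append((name, win_number))
--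
--     participants.sort(key=lambda x: (-x[1], x[0]))
--
--     return participants[n - 1][0]
-- ===== SOURCE B (Python) =====
-- def calc_som(name):
--     som = 0
--     name = name.upper()
--     for ch in name:
--         if "A" <= ch <= "Z":
--             som += ord(ch) - ord("A") + 1
--     return som + len(name)
--
-- def prize_draw(st, we, n):
--     # Iterative quickselect of the (n-1)th order statistic instead of a full sort.
--     if not st:
--         return "Нет участников"
--
--     names = st.split(",")
--
--     if n > len(names):
--         return "Недостаточно участников"
--
--     items = [(-(calc_som(name) * we[i]), name) for i, name in enumerate(names)]
--
--     k = n - 1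
--     while True:
--         pivot = items[0]
--         less = [x for x in items if x < pivot]
--         if k < len(less):
--             items = less
--             continue
--         eq_count = sum(1 for x in items if x == pivot)
--         if k < len(less) + eq_count:
--             return pivot[1]
--         k -= len(less) + eq_count
--         items = [x for x in items if x > pivot]
-- ===== Notes on version B (the rewrite author's own statement) =====
-- stated objective: alternative
-- what changed: B replaces A's full sort of all participants by an iterative quickselect (three-way partition around the first element) that extracts only the (n-1)th order statistic under the same (-win, name) lexicographic key.
-- outside the precondition, e.g. on prize_draw('a,b', [1, 1], 0): A returns 'a', B raises IndexError
import Mathlib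
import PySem

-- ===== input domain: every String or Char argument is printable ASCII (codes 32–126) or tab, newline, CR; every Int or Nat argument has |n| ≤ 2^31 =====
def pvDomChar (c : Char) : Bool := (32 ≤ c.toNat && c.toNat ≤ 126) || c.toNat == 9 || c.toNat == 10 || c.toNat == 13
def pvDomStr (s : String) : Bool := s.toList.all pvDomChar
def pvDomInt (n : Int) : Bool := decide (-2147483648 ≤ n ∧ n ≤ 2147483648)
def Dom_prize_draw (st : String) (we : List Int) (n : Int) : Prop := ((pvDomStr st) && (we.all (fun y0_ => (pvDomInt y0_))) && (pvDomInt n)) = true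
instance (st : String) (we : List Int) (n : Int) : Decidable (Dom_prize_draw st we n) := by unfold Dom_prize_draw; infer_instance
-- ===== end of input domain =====

-- B replaces the full sort of A by an iterative quickselect of the (n-1)th order
-- statistic under the same (-win, name) lexicographic key; alternative algorithm,
-- no speed claim.


-- ===== PORT A =====

-- calc_som: sum of letter positions of the uppercased name, plus its length
def pvCalcSom (name : String) : Int :=
  let u := PySem.Chars.upper name.toList
  (u.foldl (fun som ch =>
      if 'A' ≤ ch ∧ ch ≤ 'Z' then som + ((ch.toNat : Int) - ('A'.toNat : Int) + 1) else som) 0)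
    + (u.length : Int)

def prize_draw (st : String) (we : List Int) (n : Int) : String :=
  if st = "" then "Нет участников"
  else
    let names := (PySem.Str.split? st ",").getD []
    if n > (names.length : Int) then "Недостаточно участников"
    else
      let participants := (PySem.List.enumerate names).foldl
        (fun acc p => acc ++ [(p.2, pvCalcSom p.2 * PySem.List.pyGetD we p.1 0)]) []
      let sortedPs := PySem.List.sorted2 participants (fun x => -x.2) (fun x => x.1) false
      (PySem.List.pyGetD sortedPs (n - 1) ("", 0)).1

-- ===== PORT B =====

-- Python tuple comparison (int, str) < (int, str): first component, then the string
def pvPyLt (a b : Int × String) : Bool :=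
  if a.1 = b.1 then decide (a.2 < b.2) else decide (a.1 < b.1)

-- the while-True quickselect loop of B ("" = the unreachable empty-list IndexError case)
def pvQuickselect : List (Int × String) → Int → String
  | [], _ => ""
  | pivot :: rest, k =>
    let items := pivot :: rest
    let less := items.filter (fun x => pvPyLt x pivot)
    if k < (less.length : Int) then pvQuickselect less k
    else
      let eqCount := (items.filter (fun x => x == pivot)).length
      if k < (less.length : Int) + (eqCount : Int) then pivot.2
      else pvQuickselect (items.filter (fun x => pvPyLt pivot x)) (k - less.length - eqCount)
termination_by items _ => items.length
decreasing_by
  · exact List.length_filter_lt_length_iff_exists.mpr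
      ⟨pivot, List.mem_cons_self, by simp [pvPyLt]⟩
  · exact List.length_filter_lt_length_iff_exists.mpr
      ⟨pivot, List.mem_cons_self, by simp [pvPyLt]⟩

def prize_draw_alt (st : String) (we : List Int) (n : Int) : String :=
  if st = "" then "Нет участников"
  else
    let names := (PySem.Str.split? st ",").getD []
    if n > (names.length : Int) then "Недостаточно участников"
    else
      let items := (PySem.List.enumerate names).map
        (fun p => (-(pvCalcSom p.2 * PySem.List.pyGetD we p.1 0), p.2))
      pvQuickselect items (n - 1)

-- ===== PRECONDITION & SPEC =====

-- Pre_ restricts the rank to its natural one-based domain n ≥ 1 and requires one weight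
-- per name: for 0 ≥ n > -len(names) A returns a participant via Python's negative-index
-- wraparound where B's quickselect raises IndexError, and for n ≤ -len(names) or a `we`
-- shorter than the name list A itself raises IndexError.
def Pre_prize_draw (st : String) (we : List Int) (n : Int) : Prop :=
  st = "" ∨ n > (((PySem.Str.split? st ",").getD []).length : Int) ∨
    (1 ≤ n ∧ ((PySem.Str.split? st ",").getD []).length ≤ we.length)
instance (st : String) (we : List Int) (n : Int) : Decidable (Pre_prize_draw st we n) := by
  unfold Pre_prize_draw; infer_instance

def pvWitness_prize_draw : String × List Int × Int := ("ab,c", ([2, 3], 1))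

def Spec_prize_draw (st : String) (we : List Int) (n : Int) (out : String) : Prop := out = prize_draw_alt st we n
instance (st : String) (we : List Int) (n : Int) (out : String) : Decidable (Spec_prize_draw st we n out) := by unfold Spec_prize_draw; infer_instance

-- ===== CLAIM (what is proved, stated in full; the proofs are below) =====
def Claim_equal_prize_draw : Prop := ∀ (st : String) (we : List Int) (n : Int), Dom_prize_draw st we n → Pre_prize_draw st we n → Spec_prize_draw st we n (prize_draw st we n)

-- ===== LEMMAS AND PROOFS =====

-- the Python tuple order is the lexicographic order on Int ×ₗ String
theorem pvPyLt_eq (a b : Int × String) : pvPyLt a b = decide (toLex a < toLex b) := by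
  by_cases h : a.1 = b.1 <;>
    simp [pvPyLt, h, Prod.Lex.toLex_lt_toLex]

-- sorted2 with two keys is sorted with the lexicographic pair key
theorem pvSorted2_eq {α κ₁ κ₂ : Type} [LinearOrder κ₁] [LinearOrder κ₂]
    (xs : List α) (k1 : α → κ₁) (k2 : α → κ₂) :
    PySem.List.sorted2 xs k1 k2 false
      = PySem.List.sorted xs (fun x => toLex (k1 x, k2 x)) false := by
  show List.foldl _ [] xs = List.foldl _ [] xs
  have hc : (fun (a b : α) => decide (k1 a < k1 b) || (!decide (k1 b < k1 a) && decide (k2 a < k2 b)))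
      = (fun a b => decide (toLex (k1 a, k2 a) < toLex (k1 b, k2 b))) := by
    funext a b
    rcases lt_trichotomy (k1 a) (k1 b) with h | h | h
    · simp [h, Prod.Lex.toLex_lt_toLex, lt_asymm h]
    · simp [h, Prod.Lex.toLex_lt_toLex]
    · simp [h, Prod.Lex.toLex_lt_toLex, lt_asymm h, ne_of_gt h]
  rw [hc]

-- insertBy commutes with map when the comparator factors through the map
theorem pvInsertBy_map {α β : Type} (g : α → β) (before : β → β → Bool) (x : α) (ys : List α) :
    PySem.List.insertBy before (g x) (ys.map g)
      = (PySem.List.insertBy (fun a b => before (g a) (g b)) x ys).map g := by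
  induction ys with
  | nil => simp [PySem.List.insertBy]
  | cons y ys ih =>
    simp only [List.map_cons, PySem.List.insertBy]
    split <;> simp_all

-- sorted of a mapped list is the mapped sorted list (key composed with the map)
theorem pvSorted_map {α β κ : Type} [LT κ] [DecidableLT κ] (g : α → β) (xs : List α) (key : β → κ) :
    PySem.List.sorted (xs.map g) key false
      = (PySem.List.sorted xs (fun x => key (g x)) false).map g := by
  show List.foldl _ [] _ = _
  have main : ∀ (l : List α) (acc : List α),
      List.foldl (fun acc x => PySem.List.insertBy (fun a b => decide (key a < key b)) x acc)
        (acc.map g) (l.map g)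
      = (List.foldl (fun acc x => PySem.List.insertBy (fun a b => decide (key (g a) < key (g b))) x acc)
          acc l).map g := by
    intro l
    induction l with
    | nil => intro acc; simp
    | cons x l ih =>
      intro acc
      simp only [List.map_cons, List.foldl_cons]
      rw [pvInsertBy_map g _ x acc, ih]
  exact main xs []

-- a list is a permutation of its three-way partition by two exclusive tests
theorem pvFilter_partition_perm {α : Type} (l : List α) (pl pg : α → Bool)
    (h : ∀ x, ¬(pl x = true ∧ pg x = true)) :
    l.Perm (l.filter pl ++ (l.filter (fun x => !pl x && !pg x) ++ l.filter pg)) := by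
  induction l with
  | nil => simp
  | cons x l ih =>
    by_cases hl : pl x = true
    · have hg : pg x = false := by
        rcases Bool.eq_false_or_eq_true (pg x) with h' | h'
        · exact absurd ⟨hl, h'⟩ (h x)
        · exact h'
      simpa [List.filter_cons, hl, hg] using ih.cons x
    · have hl' : pl x = false := by simpa using hl
      by_cases hg : pg x = true
      · simp only [List.filter_cons, hl', hg, Bool.not_true, Bool.and_false]
        refine (ih.cons x).trans ?_
        have := (List.perm_middle (a := x)
          (l₁ := l.filter pl ++ l.filter (fun x => !pl x && !pg x)) (l₂ := l.filter pg)).symm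
        simpa [List.append_assoc] using this
      · have hg' : pg x = false := by simpa using hg
        simp only [List.filter_cons, hl', hg', Bool.not_false, Bool.and_self]
        refine (ih.cons x).trans ?_
        exact (List.perm_middle (a := x) (l₁ := l.filter pl)
          (l₂ := l.filter (fun x => !pl x && !pg x) ++ l.filter pg)).symm

-- quickselect returns the k-th component of the sorted list
theorem pvQsel_eq (items : List (Int × String)) (k : Int) (h0 : 0 ≤ k)
    (h1 : k.toNat < items.length) :
    pvQuickselect items k
      = ((PySem.List.sorted items (fun x => toLex x) false)[k.toNat]'
          (by rw [PySem.List.length_sorted]; exact h1)).2 := by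
  match items with
  | [] => exact absurd h1 (by simp)
  | pivot :: rest =>
    set items := pivot :: rest with hitems
    set L := items.filter (fun x => pvPyLt x pivot) with hL
    set E := items.filter (fun x => x == pivot) with hE
    set G := items.filter (fun x => pvPyLt pivot x) with hG
    have hEpred : (fun x : Int × String => x == pivot)
        = (fun x => !pvPyLt x pivot && !pvPyLt pivot x) := by
      funext x
      rw [pvPyLt_eq, pvPyLt_eq]
      by_cases hx : x = pivot
      · simp [hx]
      · have hne : toLex x ≠ toLex pivot := fun hh => hx (toLex.injective hh)
        rcases lt_or_gt_of_ne hne with h | h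
        · simp [hx, h, lt_asymm h]
        · simp [hx, lt_asymm h, h]
    have hexcl : ∀ x : Int × String,
        ¬((fun x => pvPyLt x pivot) x = true ∧ (fun x => pvPyLt pivot x) x = true) := by
      intro x ⟨h1', h2'⟩
      replace h1' : pvPyLt x pivot = true := h1'
      replace h2' : pvPyLt pivot x = true := h2'
      rw [pvPyLt_eq] at h1' h2'
      exact lt_asymm (of_decide_eq_true h1') (of_decide_eq_true h2')
    have hperm : items.Perm (L ++ (E ++ G)) := by
      rw [hL, hE, hG, hEpred]
      exact pvFilter_partition_perm items _ _ hexcl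
    have hlen : items.length = L.length + E.length + G.length := by
      have := hperm.length_eq
      simp [this, List.length_append]; omega
    -- members of the three blocks
    have hmemL : ∀ x ∈ L, toLex x < toLex pivot := by
      intro x hx
      have := (List.mem_filter.mp hx).2
      rw [pvPyLt_eq] at this
      exact of_decide_eq_true this
    have hmemE : ∀ x ∈ E, x = pivot := by
      intro x hx
      exact beq_iff_eq.mp (List.mem_filter.mp hx).2
    have hmemG : ∀ x ∈ G, toLex pivot < toLex x := by
      intro x hx
      have := (List.mem_filter.mp hx).2
      rw [pvPyLt_eq] at this
      exact of_decide_eq_true this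
    -- the sorted list decomposes along the partition
    have hS : PySem.List.sorted items (fun x => toLex x) false
        = PySem.List.sorted L (fun x => toLex x) false
          ++ (E ++ PySem.List.sorted G (fun x => toLex x) false) := by
      refine PySem.List.eq_of_perm_of_pairwise_le_of_injective (fun x => toLex x)
        (fun a b hh => toLex.injective hh) ?_ ?_ ?_
      · refine (PySem.List.sorted_perm items _ false).trans (hperm.trans ?_)
        exact ((PySem.List.sorted_perm L _ false).symm.append
          ((List.Perm.refl E).append (PySem.List.sorted_perm G _ false).symm))
      · exact PySem.List.sorted_pairwise items _
      · refine List.pairwise_append.mpr ⟨PySem.List.sorted_pairwise L _, ?_, ?_⟩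
        · refine List.pairwise_append.mpr ⟨?_, PySem.List.sorted_pairwise G _, ?_⟩
          · refine List.pairwise_of_forall_mem_list ?_
            intro a ha b hb
            rw [hmemE a ha, hmemE b hb]
          · intro a ha b hb
            have hb' := hmemG b ((PySem.List.mem_sorted G _ false b).mp hb)
            rw [hmemE a ha]
            exact le_of_lt hb'
        · intro a ha b hb
          have ha' := hmemL a ((PySem.List.mem_sorted L _ false a).mp ha)
          rcases List.mem_append.mp hb with hb | hb
          · rw [hmemE b hb]; exact le_of_lt ha'
          · have hb' := hmemG b ((PySem.List.mem_sorted G _ false b).mp hb)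
            exact le_of_lt (ha'.trans hb')
    have hlenSL : (PySem.List.sorted L (fun x : Int × String => toLex x) false).length = L.length :=
      PySem.List.length_sorted L _ false
    -- unfold one step of the loop
    rw [pvQuickselect]
    simp only []
    by_cases hb1 : k < (L.length : Int)
    · have hk : k.toNat < L.length := by omega
      rw [if_pos hb1, pvQsel_eq L k h0 hk]
      rw [List.getElem_of_eq hS, List.getElem_append_left (by omega)]
    · rw [if_neg hb1]
      by_cases hb2 : k < (L.length : Int) + (E.length : Int)
      · rw [if_pos hb2]
        have h1' : L.length ≤ k.toNat := by omega
        have h2' : k.toNat - L.length < E.length := by omega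
        have : (PySem.List.sorted items (fun x : Int × String => toLex x) false)[k.toNat]'
            (by rw [PySem.List.length_sorted]; exact h1) = pivot := by
          rw [List.getElem_of_eq hS, List.getElem_append_right (by omega)]
          rw [List.getElem_append_left (by rw [hlenSL]; omega)]
          exact hmemE _ (List.getElem_mem _)
        rw [this]
      · rw [if_neg hb2]
        have h0' : (0 : Int) ≤ k - L.length - E.length := by omega
        have hk' : (k - (L.length : Int) - (E.length : Int)).toNat < G.length := by omega
        rw [pvQsel_eq G _ h0' hk']
        rw [List.getElem_of_eq hS, List.getElem_append_right (by omega),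
          List.getElem_append_right (by rw [hlenSL]; omega)]
        congr 2
        rw [hlenSL]
        omega
termination_by items.length
decreasing_by
  · exact List.length_filter_lt_length_iff_exists.mpr
      ⟨pivot, List.mem_cons_self, by simp [pvPyLt]⟩
  · exact List.length_filter_lt_length_iff_exists.mpr
      ⟨pivot, List.mem_cons_self, by simp [pvPyLt]⟩

-- ===== VERDICT (by name: the statement is the Claim_ definition above) =====
theorem prize_draw_spec : Claim_equal_prize_draw := by
  intro st we n _ hpre
  unfold Spec_prize_draw prize_draw prize_draw_alt
  by_cases h1 : st = ""
  · simp [h1]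
  · rw [if_neg h1, if_neg h1]
    set names := (PySem.Str.split? st ",").getD [] with hnames
    by_cases h2 : n > (names.length : Int)
    · rw [if_pos h2, if_pos h2]
    · rw [if_neg h2, if_neg h2]
      have hn1 : 1 ≤ n := by
        rcases hpre with h | h | h
        · exact absurd h h1
        · exact absurd h h2
        · exact h.1
      have hnle : n ≤ (names.length : Int) := le_of_not_gt h2
      simp only [PySem.List.foldl_append_singleton_eq_map
        (fun p : Int × String => (p.2, pvCalcSom p.2 * PySem.List.pyGetD we p.1 0)),
        List.nil_append]
      set ps := (PySem.List.enumerate names).map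
        (fun p : Int × String => (p.2, pvCalcSom p.2 * PySem.List.pyGetD we p.1 0)) with hps
      have hpslen : ps.length = names.length := by
        simp [hps, PySem.List.length_enumerate]
      have hmap : (PySem.List.enumerate names).map
          (fun p : Int × String => (-(pvCalcSom p.2 * PySem.List.pyGetD we p.1 0), p.2))
          = ps.map (fun x : String × Int => (-x.2, x.1)) := by
        rw [hps, List.map_map]
        rfl
      have hk0 : (0 : Int) ≤ n - 1 := by omega
      have hklt : (n - 1).toNat < (ps.map (fun x : String × Int => (-x.2, x.1))).length := by
        rw [List.length_map, hpslen]; omega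
      rw [hmap, pvQsel_eq _ _ hk0 hklt]
      rw [pvSorted2_eq ps (fun x => -x.2) (fun x => x.1)]
      have hsm := pvSorted_map (fun x : String × Int => (-x.2, x.1)) ps
        (fun x : Int × String => toLex x)
      rw [List.getElem_of_eq hsm, List.getElem_map]
      rw [PySem.List.pyGetD_eq_getElem _ _ hk0
        (by rw [PySem.List.length_sorted, hpslen]; omega)]
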